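-- pv_equiv track=rewrite | github.com/rahul38888/coding_practice | src/practices/practice/replace_by_x/script.py | replace_by_x
-- ===== SOURCE A (Python) =====
-- def replace_by_x(s, p):
--     i = 0
--     result = ""
--     last_was_X = False
--     while i < len(s):
--         if s[i:i+len(p)] == p and not(last_was_X):
--             result += "X"
--             last_was_X = True
--             i += len(p)
--             continue
--         elif s[i:i+len(p)] == p and last_was_X:
--             i += len(p)
--             continue
--         else:
--             last_was_X = False
--             result += s[i]
--         i += 1
--
--     return result
-- ===== SOURCE B (Python) =====
-- def replace_by_x(s, p):
--     # Scan with str.find: emit literal chunks between matches, one "X" per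
--     # maximal run of adjacent occurrences of p. Requires p non-empty (A
--     # loops forever on p == "" with non-empty s).
--     parts = []
--     i = 0
--     m = len(p)
--     while True:
--         j = s.find(p, i)
--         if j == -1:
--             parts.append(s[i:])
--             break
--         parts.append(s[i:j])
--         parts.append("X")
--         i = j + m
--         while s.startswith(p, i):
--             i += m
--     return "".join(parts)
-- ===== Notes on version B (the rewrite author's own statement) =====
-- stated objective: faster
-- what changed: B replaces A's position-by-position loop that slices and compares s[i:i+len(p)] at every index with a str.find-driven scan that jumps from occurrence to occurrence, emitting literal chunks between matches and one X per run of adjacent matches, joined at the end.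
-- outside the precondition, e.g. on replace_by_x('', ''): A returns '', B does not finish within the time limit
import Mathlib
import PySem

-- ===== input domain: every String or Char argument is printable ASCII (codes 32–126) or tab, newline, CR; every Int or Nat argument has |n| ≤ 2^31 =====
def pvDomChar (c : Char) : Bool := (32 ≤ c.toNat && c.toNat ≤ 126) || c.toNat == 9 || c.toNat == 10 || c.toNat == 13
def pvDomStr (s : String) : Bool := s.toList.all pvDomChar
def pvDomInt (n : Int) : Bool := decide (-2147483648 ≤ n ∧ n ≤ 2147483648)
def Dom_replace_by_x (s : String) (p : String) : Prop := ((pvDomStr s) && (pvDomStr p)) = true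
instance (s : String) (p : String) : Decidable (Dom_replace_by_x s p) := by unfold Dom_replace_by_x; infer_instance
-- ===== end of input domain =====

-- B replaces A's position-by-position slice-and-compare loop by a find-driven scan
-- (jump from occurrence to occurrence, one "X" per run of adjacent occurrences);
-- objective: faster. Equivalence is proved for non-empty p (A loops forever on p = ""
-- with non-empty s).

-- ===== PORT A =====
-- Literal port of A's while loop; fuel = len(s)+1 bounds the iterations (each step
-- advances i by ≥ 1 when p ≠ ""; for p = "" Python diverges, which Pre_ excludes).
def pvLoopA (cs ps : List Char) : Nat → Nat → List Char → Bool → List Char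
  | 0, _, result, _ => result
  | fuel+1, i, result, lastX =>
    if i < cs.length then
      -- s[i:i+len(p)] == p and not last_was_X
      if PySem.List.slice cs (some (i:Int)) (some ((i:Int)+(ps.length:Int))) = ps ∧ lastX = false then
        pvLoopA cs ps fuel (i + ps.length) (result ++ ['X']) true
      -- s[i:i+len(p)] == p and last_was_X
      else if PySem.List.slice cs (some (i:Int)) (some ((i:Int)+(ps.length:Int))) = ps ∧ lastX = true then
        pvLoopA cs ps fuel (i + ps.length) result true
      else
        -- result += s[i]  (i < len(s), so pyGet? is some; .toList appends that char)
        pvLoopA cs ps fuel (i+1) (result ++ (PySem.List.pyGet? cs (i:Int)).toList) false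
    else result

def replace_by_x (s : String) (p : String) : String :=
  String.ofList (pvLoopA s.toList p.toList (s.toList.length + 1) 0 [] false)

-- ===== PORT B =====
-- Literal port of B: 'while s.startswith(p, i): i += len(p)'  (fuel-bounded)
def pvSkipB (cs ps : List Char) : Nat → Nat → Nat
  | 0, i => i
  | fuel+1, i =>
    if PySem.Chars.startswith (cs.drop i) ps then pvSkipB cs ps fuel (i + ps.length) else i

-- Literal port of B's outer loop: j = s.find(p, i); chunk, "X", collapse run.
def pvLoopB (cs ps : List Char) : Nat → Nat → List (List Char) → List (List Char)
  | 0, _, parts => parts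
  | fuel+1, i, parts =>
    let j := PySem.Chars.findFrom cs ps (i:Int)
    if j = -1 then parts ++ [PySem.List.slice cs (some (i:Int)) none]
    else pvLoopB cs ps fuel
      (pvSkipB cs ps (cs.length + 1) (j.toNat + ps.length))
      (parts ++ [PySem.List.slice cs (some (i:Int)) (some j), ['X']])

def replace_by_x_alt (s : String) (p : String) : String :=
  String.ofList (List.flatten (pvLoopB s.toList p.toList (s.toList.length + 2) 0 []))

-- ===== PRECONDITION & SPEC =====
-- Pre_ excludes p = "": there Python A diverges for every non-empty s (the empty
-- pattern matches at every position and i never advances), and B diverges too;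
-- the only excluded input where A returns is ("", ""), where A returns "".
def Pre_replace_by_x (s : String) (p : String) : Prop := p ≠ ""
instance (s : String) (p : String) : Decidable (Pre_replace_by_x s p) := by
  unfold Pre_replace_by_x; infer_instance

-- one input inside Dom ∧ Pre_
def pvWitness_replace_by_x : String × String := ("xayaa", "a")

def Spec_replace_by_x (s : String) (p : String) (out : String) : Prop := out = replace_by_x_alt s p
instance (s : String) (p : String) (out : String) : Decidable (Spec_replace_by_x s p out) := by unfold Spec_replace_by_x; infer_instance

-- ===== CLAIM (what is proved, stated in full; the proofs are below) =====
def Claim_equal_replace_by_x : Prop := ∀ (s : String) (p : String), Dom_replace_by_x s p → Pre_replace_by_x s p → Spec_replace_by_x s p (replace_by_x s p)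

-- ===== LEMMAS AND PROOFS =====


-- one-step unfolding lemmas (definitional)
theorem loopA_succ (cs ps : List Char) (fuel i : Nat) (r : List Char) (b : Bool) :
    pvLoopA cs ps (fuel+1) i r b =
    if i < cs.length then
      if PySem.List.slice cs (some (i:Int)) (some ((i:Int)+(ps.length:Int))) = ps ∧ b = false then
        pvLoopA cs ps fuel (i + ps.length) (r ++ ['X']) true
      else if PySem.List.slice cs (some (i:Int)) (some ((i:Int)+(ps.length:Int))) = ps ∧ b = true then
        pvLoopA cs ps fuel (i + ps.length) r true
      else
        pvLoopA cs ps fuel (i+1) (r ++ (PySem.List.pyGet? cs (i:Int)).toList) false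
    else r := rfl

theorem skipB_succ (cs ps : List Char) (fuel i : Nat) :
    pvSkipB cs ps (fuel+1) i =
    if PySem.Chars.startswith (cs.drop i) ps then pvSkipB cs ps fuel (i + ps.length) else i := rfl

theorem loopB_succ (cs ps : List Char) (fuel i : Nat) (parts : List (List Char)) :
    pvLoopB cs ps (fuel+1) i parts =
    if PySem.Chars.findFrom cs ps (i:Int) = -1 then
      parts ++ [PySem.List.slice cs (some (i:Int)) none]
    else pvLoopB cs ps fuel
      (pvSkipB cs ps (cs.length + 1) ((PySem.Chars.findFrom cs ps (i:Int)).toNat + ps.length))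
      (parts ++ [PySem.List.slice cs (some (i:Int)) (some (PySem.Chars.findFrom cs ps (i:Int))), ['X']]) := rfl

-- canonical-fuel versions of the three loops (proof helpers)
def runA (cs ps : List Char) (i : Nat) (r : List Char) (b : Bool) : List Char :=
  pvLoopA cs ps (cs.length + 1 - i) i r b

def runSkip (cs ps : List Char) (i : Nat) : Nat :=
  pvSkipB cs ps (cs.length + 1) i

def runB (cs ps : List Char) (i : Nat) (parts : List (List Char)) : List (List Char) :=
  pvLoopB cs ps (cs.length + 2 - i) i parts

-- A's slice test is a prefix test
theorem sliceA_eq_iff (cs ps : List Char) (i : Nat) :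
    PySem.List.slice cs (some (i:Int)) (some ((i:Int)+(ps.length:Int))) = ps ↔ ps <+: cs.drop i := by
  rw [PySem.List.slice_natCast_add, List.prefix_iff_eq_take, eq_comm]

theorem prefix_len_le {cs ps : List Char} {i : Nat} (h : ps <+: cs.drop i) :
    i + ps.length ≤ cs.length ∨ cs.length ≤ i := by
  rcases Nat.lt_or_ge i cs.length with hi | hi
  · left
    have := h.length_le
    simp [List.length_drop] at this
    omega
  · right; exact hi

theorem prefix_pos_lt {cs ps : List Char} {i : Nat} (hm : ps ≠ []) (h : ps <+: cs.drop i) :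
    i + ps.length ≤ cs.length := by
  rcases prefix_len_le h with h1 | h1
  · exact h1
  · exfalso
    have : cs.drop i = [] := List.drop_eq_nil_of_le h1
    rw [this] at h
    exact hm (List.prefix_nil.mp h)

theorem loopA_stop (cs ps : List Char) (fuel i : Nat) (r : List Char) (b : Bool)
    (h : cs.length ≤ i) : pvLoopA cs ps fuel i r b = r := by
  cases fuel with
  | zero => rfl
  | succ fuel => simp [pvLoopA, Nat.not_lt.mpr h]

theorem loopA_fuel (cs ps : List Char) (hm : ps ≠ []) :
    ∀ fuel i r b, cs.length - i < fuel →
      pvLoopA cs ps fuel i r b = pvLoopA cs ps (fuel+1) i r b := by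
  intro fuel
  induction fuel with
  | zero => intro i r b h; omega
  | succ fuel ih =>
    intro i r b h
    have hmlen : 0 < ps.length := List.length_pos_iff.mpr hm
    by_cases hi : i < cs.length
    · rw [loopA_succ, loopA_succ, if_pos hi, if_pos hi]
      split_ifs with h1 h2
      · have hle := prefix_pos_lt hm ((sliceA_eq_iff cs ps i).mp h1.1)
        exact ih _ _ _ (by omega)
      · have hle := prefix_pos_lt hm ((sliceA_eq_iff cs ps i).mp h2.1)
        exact ih _ _ _ (by omega)
      · exact ih _ _ _ (by omega)
    · rw [loopA_stop cs ps (fuel+1) i r b (by omega), loopA_stop cs ps (fuel+1+1) i r b (by omega)]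
theorem loopA_fuel_mono (cs ps : List Char) (hm : ps ≠ []) (f₁ f₂ i : Nat) (r : List Char) (b : Bool)
    (h1 : cs.length - i < f₁) (hle : f₁ ≤ f₂) :
    pvLoopA cs ps f₁ i r b = pvLoopA cs ps f₂ i r b := by
  obtain ⟨k, rfl⟩ := Nat.exists_eq_add_of_le hle
  clear hle
  induction k with
  | zero => rfl
  | succ k ih => rw [ih, ← Nat.add_assoc, loopA_fuel cs ps hm (f₁ + k) i r b (by omega)]
theorem runA_eq (cs ps : List Char) (hm : ps ≠ []) (fuel i : Nat) (r : List Char) (b : Bool)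
    (h : cs.length - i < fuel) : pvLoopA cs ps fuel i r b = runA cs ps i r b := by
  by_cases hi : i ≤ cs.length
  · unfold runA
    rcases Nat.le_total fuel (cs.length + 1 - i) with hle | hle
    · exact loopA_fuel_mono cs ps hm fuel (cs.length + 1 - i) i r b h hle
    · exact (loopA_fuel_mono cs ps hm (cs.length + 1 - i) fuel i r b (by omega) hle).symm
  · rw [loopA_stop cs ps fuel i r b (by omega), runA, loopA_stop cs ps _ i r b (by omega)]

theorem runA_stop (cs ps : List Char) (i : Nat) (r : List Char) (b : Bool)
    (h : cs.length ≤ i) : runA cs ps i r b = r :=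
  loopA_stop cs ps _ i r b h

theorem runA_nomatch (cs ps : List Char) (hm : ps ≠ []) (i : Nat) (r : List Char) (b : Bool)
    (hi : i < cs.length) (hnm : ¬ ps <+: cs.drop i) :
    runA cs ps i r b = runA cs ps (i+1) (r ++ [cs[i]]) false := by
  have hf : cs.length + 1 - i = (cs.length - i) + 1 := by omega
  rw [runA, hf, loopA_succ, if_pos hi]
  split_ifs with h1 h2
  · exact absurd ((sliceA_eq_iff cs ps i).mp h1.1) hnm
  · exact absurd ((sliceA_eq_iff cs ps i).mp h2.1) hnm
  · rw [PySem.List.pyGet?_natCast, List.getElem?_eq_getElem hi]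
    exact runA_eq cs ps hm (cs.length - i) (i+1) (r ++ [cs[i]]) false (by omega)
theorem runA_match_false (cs ps : List Char) (hm : ps ≠ []) (i : Nat) (r : List Char)
    (hi : i < cs.length) (hmt : ps <+: cs.drop i) :
    runA cs ps i r false = runA cs ps (i + ps.length) (r ++ ['X']) true := by
  have hmlen : 0 < ps.length := List.length_pos_iff.mpr hm
  have hs := (sliceA_eq_iff cs ps i).mpr hmt
  have hle := prefix_pos_lt hm hmt
  have hf : cs.length + 1 - i = (cs.length - i) + 1 := by omega
  rw [runA, hf, loopA_succ, if_pos hi, if_pos (And.intro hs rfl)]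
  exact runA_eq cs ps hm (cs.length - i) (i + ps.length) (r ++ ['X']) true (by omega)
theorem runA_match_true (cs ps : List Char) (hm : ps ≠ []) (i : Nat) (r : List Char)
    (hi : i < cs.length) (hmt : ps <+: cs.drop i) :
    runA cs ps i r true = runA cs ps (i + ps.length) r true := by
  have hmlen : 0 < ps.length := List.length_pos_iff.mpr hm
  have hs := (sliceA_eq_iff cs ps i).mpr hmt
  have hle := prefix_pos_lt hm hmt
  have hf : cs.length + 1 - i = (cs.length - i) + 1 := by omega
  rw [runA, hf, loopA_succ, if_pos hi]
  rw [if_neg (show ¬(PySem.List.slice cs (some (i:Int)) (some ((i:Int)+(ps.length:Int))) = ps ∧ ((true:Bool) = false)) from by simp)]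
  rw [if_pos (show PySem.List.slice cs (some (i:Int)) (some ((i:Int)+(ps.length:Int))) = ps ∧ ((true:Bool) = true) from ⟨hs, rfl⟩)]
  exact runA_eq cs ps hm (cs.length - i) (i + ps.length) r true (by omega)
theorem runA_true_eq_false (cs ps : List Char) (hm : ps ≠ []) (i : Nat) (r : List Char)
    (hnm : ¬ ps <+: cs.drop i) : runA cs ps i r true = runA cs ps i r false := by
  by_cases hi : i < cs.length
  · rw [runA_nomatch cs ps hm i r true hi hnm, runA_nomatch cs ps hm i r false hi hnm]
  · rw [runA_stop cs ps i r true (by omega), runA_stop cs ps i r false (by omega)]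

theorem loopA_append (cs ps : List Char) :
    ∀ fuel i r b, pvLoopA cs ps fuel i r b = r ++ pvLoopA cs ps fuel i [] b := by
  intro fuel
  induction fuel with
  | zero => intro i r b; simp [pvLoopA]
  | succ fuel ih =>
    intro i r b
    by_cases hi : i < cs.length
    · rw [loopA_succ, loopA_succ, if_pos hi, if_pos hi]
      split_ifs with h1 h2
      · rw [ih (i + ps.length) (r ++ ['X']) true, ih (i + ps.length) ([] ++ ['X']) true]
        simp
      · exact ih (i + ps.length) r true
      · rw [ih (i+1) (r ++ _) false, ih (i+1) ([] ++ _) false]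
        simp
    · rw [loopA_stop cs ps _ i r b (by omega), loopA_stop cs ps _ i [] b (by omega)]
      simp
theorem runA_append (cs ps : List Char) (i : Nat) (r : List Char) (b : Bool) :
    runA cs ps i r b = r ++ runA cs ps i [] b :=
  loopA_append cs ps _ i r b

-- walking a run of non-matching positions
theorem runA_literal_run (cs ps : List Char) (hm : ps ≠ []) :
    ∀ d i r, i + d ≤ cs.length → (∀ k, i ≤ k → k < i + d → ¬ ps <+: cs.drop k) →
      runA cs ps i r false = runA cs ps (i+d) (r ++ (cs.drop i).take d) false := by
  intro d
  induction d with
  | zero => intro i r _ _; simp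
  | succ d ih =>
    intro i r hle hnm
    have hi : i < cs.length := by omega
    have htake : List.take (d+1) (List.drop i cs) = cs[i] :: List.take d (List.drop (i+1) cs) := by
      rw [List.drop_eq_getElem_cons hi, List.take_succ_cons]
    rw [runA_nomatch cs ps hm i r false hi (hnm i (le_refl i) (by omega)),
        ih (i+1) (r ++ [cs[i]]) (by omega) (fun k hk1 hk2 => hnm k (by omega) (by omega)),
        htake, show i + 1 + d = i + (d+1) from by omega]
    simp
theorem runA_allnomatch (cs ps : List Char) (hm : ps ≠ []) :
    ∀ d i r, cs.length - i ≤ d → (∀ k, i ≤ k → ¬ ps <+: cs.drop k) →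
      runA cs ps i r false = r ++ cs.drop i := by
  intro d
  induction d with
  | zero =>
    intro i r hd _
    rw [runA_stop cs ps i r false (by omega), List.drop_eq_nil_of_le (by omega)]
    simp
  | succ d ih =>
    intro i r hd hnm
    by_cases hi : i < cs.length
    · rw [runA_nomatch cs ps hm i r false hi (hnm i (le_refl i))]
      rw [ih (i+1) (r ++ [cs[i]]) (by omega) (fun k hk => hnm k (by omega))]
      rw [List.drop_eq_getElem_cons hi]
      simp
    · rw [runA_stop cs ps i r false (by omega), List.drop_eq_nil_of_le (by omega)]
      simp

-- ==== skip loop ====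

theorem skipB_ge (cs ps : List Char) : ∀ fuel i, i ≤ pvSkipB cs ps fuel i := by
  intro fuel
  induction fuel with
  | zero => intro i; simp [pvSkipB]
  | succ fuel ih =>
    intro i
    rw [skipB_succ]
    split
    · exact le_trans (Nat.le_add_right i ps.length) (ih (i + ps.length))
    · exact le_refl i

theorem skipB_fuel (cs ps : List Char) (hm : ps ≠ []) :
    ∀ fuel i, cs.length - i < fuel →
      pvSkipB cs ps fuel i = pvSkipB cs ps (fuel+1) i := by
  intro fuel
  induction fuel with
  | zero => intro i h; omega
  | succ fuel ih =>
    intro i h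
    rw [skipB_succ, skipB_succ]
    split
    case isTrue hsw =>
      have hpre := (PySem.Chars.startswith_iff _ _).mp hsw
      have hle := prefix_pos_lt hm hpre
      have hmlen : 0 < ps.length := List.length_pos_iff.mpr hm
      exact ih (i + ps.length) (by omega)
    case isFalse => rfl

theorem skipB_fuel_mono (cs ps : List Char) (hm : ps ≠ []) (f₁ f₂ i : Nat)
    (h1 : cs.length - i < f₁) (hle : f₁ ≤ f₂) :
    pvSkipB cs ps f₁ i = pvSkipB cs ps f₂ i := by
  obtain ⟨k, rfl⟩ := Nat.exists_eq_add_of_le hle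
  clear hle
  induction k with
  | zero => rfl
  | succ k ih => rw [ih, ← Nat.add_assoc, skipB_fuel cs ps hm (f₁ + k) i (by omega)]

theorem runSkip_nomatch (cs ps : List Char) (i : Nat) (hnm : ¬ ps <+: cs.drop i) :
    runSkip cs ps i = i := by
  have hsw : PySem.Chars.startswith (cs.drop i) ps = false := by
    rcases Bool.eq_false_or_eq_true (PySem.Chars.startswith (cs.drop i) ps) with h | h
    · exact absurd ((PySem.Chars.startswith_iff _ _).mp h) hnm
    · exact h
  rw [runSkip, skipB_succ, hsw]
  simp
theorem runSkip_match (cs ps : List Char) (hm : ps ≠ []) (i : Nat) (hmt : ps <+: cs.drop i) :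
    runSkip cs ps i = runSkip cs ps (i + ps.length) := by
  have hsw : PySem.Chars.startswith (cs.drop i) ps = true := (PySem.Chars.startswith_iff _ _).mpr hmt
  have hle := prefix_pos_lt hm hmt
  have hmlen : 0 < ps.length := List.length_pos_iff.mpr hm
  rw [runSkip, runSkip, skipB_succ, hsw, if_pos rfl]
  exact skipB_fuel_mono cs ps hm cs.length (cs.length + 1) (i + ps.length) (by omega) (by omega)

theorem runSkip_result_nomatch (cs ps : List Char) (hm : ps ≠ []) :
    ∀ d i, cs.length - i ≤ d → ¬ ps <+: cs.drop (runSkip cs ps i) := by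
  intro d
  induction d with
  | zero =>
    intro i hd
    have hnm : ¬ ps <+: cs.drop i := by
      rw [List.drop_eq_nil_of_le (by omega)]
      intro h
      exact hm (List.prefix_nil.mp h)
    rw [runSkip_nomatch cs ps i hnm]
    exact hnm
  | succ d ih =>
    intro i hd
    by_cases hmt : ps <+: cs.drop i
    · have hle := prefix_pos_lt hm hmt
      have hmlen : 0 < ps.length := List.length_pos_iff.mpr hm
      rw [runSkip_match cs ps hm i hmt]
      exact ih (i + ps.length) (by omega)
    · rw [runSkip_nomatch cs ps i hmt]; exact hmt

theorem runSkip_le_len (cs ps : List Char) (hm : ps ≠ []) :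
    ∀ d i, cs.length - i ≤ d → i ≤ cs.length → runSkip cs ps i ≤ cs.length := by
  intro d
  induction d with
  | zero =>
    intro i hd hi
    have hnm : ¬ ps <+: cs.drop i := by
      rw [List.drop_eq_nil_of_le (by omega)]
      intro h
      exact hm (List.prefix_nil.mp h)
    rw [runSkip_nomatch cs ps i hnm]; exact hi
  | succ d ih =>
    intro i hd hi
    by_cases hmt : ps <+: cs.drop i
    · have hle := prefix_pos_lt hm hmt
      have hmlen : 0 < ps.length := List.length_pos_iff.mpr hm
      rw [runSkip_match cs ps hm i hmt]
      exact ih (i + ps.length) (by omega) (by omega)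
    · rw [runSkip_nomatch cs ps i hmt]; exact hi

-- A's lastX=true state walks exactly B's skip loop
theorem runA_skip (cs ps : List Char) (hm : ps ≠ []) :
    ∀ d i r, cs.length - i ≤ d → runA cs ps i r true = runA cs ps (runSkip cs ps i) r true := by
  intro d
  induction d with
  | zero =>
    intro i r hd
    have hnm : ¬ ps <+: cs.drop i := by
      rw [List.drop_eq_nil_of_le (by omega)]
      intro h
      exact hm (List.prefix_nil.mp h)
    rw [runSkip_nomatch cs ps i hnm]
  | succ d ih =>
    intro i r hd
    by_cases hmt : ps <+: cs.drop i
    · have hle := prefix_pos_lt hm hmt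
      have hmlen : 0 < ps.length := List.length_pos_iff.mpr hm
      have hi : i < cs.length := by omega
      rw [runA_match_true cs ps hm i r hi hmt, runSkip_match cs ps hm i hmt]
      exact ih (i + ps.length) r (by omega)
    · rw [runSkip_nomatch cs ps i hmt]

-- ==== outer loop of B ====

theorem loopB_stop (cs ps : List Char) (fuel i : Nat) (parts : List (List Char))
    (hf : 0 < fuel) (hj : PySem.Chars.findFrom cs ps (i:Int) = -1) :
    pvLoopB cs ps fuel i parts = parts ++ [cs.drop i] := by
  cases fuel with
  | zero => omega
  | succ fuel =>
    rw [loopB_succ, if_pos hj, PySem.List.slice_from_natCast]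

theorem loopB_fuel (cs ps : List Char) (hm : ps ≠ []) :
    ∀ fuel i parts, i ≤ cs.length → cs.length + 1 - i < fuel →
      pvLoopB cs ps fuel i parts = pvLoopB cs ps (fuel+1) i parts := by
  intro fuel
  induction fuel with
  | zero => intro i parts _ h; omega
  | succ fuel ih =>
    intro i parts hi h
    by_cases hj : PySem.Chars.findFrom cs ps (i:Int) = -1
    · rw [loopB_stop cs ps (fuel+1) i parts (by omega) hj,
          loopB_stop cs ps (fuel+1+1) i parts (by omega) hj]
    · have hspec := PySem.Chars.findFrom_natCast_spec cs ps i hi hj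
      obtain ⟨hij, hpre, _⟩ := hspec
      have hmlen : 0 < ps.length := List.length_pos_iff.mpr hm
      have hjn : i ≤ (PySem.Chars.findFrom cs ps (i:Int)).toNat := by omega
      have hle := prefix_pos_lt hm hpre
      set jn := (PySem.Chars.findFrom cs ps (i:Int)).toNat with hjdef
      have hsk_ge : jn + ps.length ≤ runSkip cs ps (jn + ps.length) := skipB_ge cs ps _ _
      have hsk_le : runSkip cs ps (jn + ps.length) ≤ cs.length :=
        runSkip_le_len cs ps hm (cs.length - (jn + ps.length)) (jn + ps.length) (le_refl _) hle
      rw [loopB_succ, loopB_succ, if_neg hj, if_neg hj]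
      rw [show pvSkipB cs ps (cs.length + 1) (jn + ps.length) = runSkip cs ps (jn + ps.length) from rfl]
      exact ih _ _ hsk_le (by omega)

theorem loopB_fuel_mono (cs ps : List Char) (hm : ps ≠ []) (f₁ f₂ i : Nat) (parts : List (List Char))
    (hi : i ≤ cs.length) (h1 : cs.length + 1 - i < f₁) (hle : f₁ ≤ f₂) :
    pvLoopB cs ps f₁ i parts = pvLoopB cs ps f₂ i parts := by
  obtain ⟨k, rfl⟩ := Nat.exists_eq_add_of_le hle
  clear hle
  induction k with
  | zero => rfl
  | succ k ih => rw [ih, ← Nat.add_assoc, loopB_fuel cs ps hm (f₁ + k) i parts hi (by omega)]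

theorem runB_eq (cs ps : List Char) (hm : ps ≠ []) (fuel i : Nat) (parts : List (List Char))
    (hi : i ≤ cs.length) (h : cs.length + 1 - i < fuel) :
    pvLoopB cs ps fuel i parts = runB cs ps i parts := by
  unfold runB
  rcases Nat.le_total fuel (cs.length + 2 - i) with hle | hle
  · exact loopB_fuel_mono cs ps hm fuel (cs.length + 2 - i) i parts hi h hle
  · exact (loopB_fuel_mono cs ps hm (cs.length + 2 - i) fuel i parts hi (by omega) hle).symm

theorem runB_stop (cs ps : List Char) (i : Nat) (parts : List (List Char))
    (hi : i ≤ cs.length) (hj : PySem.Chars.findFrom cs ps (i:Int) = -1) :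
    runB cs ps i parts = parts ++ [cs.drop i] :=
  loopB_stop cs ps _ i parts (by omega) hj

theorem runB_step (cs ps : List Char) (hm : ps ≠ []) (i : Nat) (parts : List (List Char))
    (hi : i ≤ cs.length) (hj : PySem.Chars.findFrom cs ps (i:Int) ≠ -1) :
    runB cs ps i parts =
      runB cs ps (runSkip cs ps ((PySem.Chars.findFrom cs ps (i:Int)).toNat + ps.length))
        (parts ++ [(cs.drop i).take ((PySem.Chars.findFrom cs ps (i:Int)).toNat - i), ['X']]) := by
  obtain ⟨hij, hpre, _⟩ := PySem.Chars.findFrom_natCast_spec cs ps i hi hj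
  have hmlen : 0 < ps.length := List.length_pos_iff.mpr hm
  have hle := prefix_pos_lt hm hpre
  set jn := (PySem.Chars.findFrom cs ps (i:Int)).toNat with hjdef
  have hsk_ge : jn + ps.length ≤ runSkip cs ps (jn + ps.length) := skipB_ge cs ps _ _
  have hsk_le : runSkip cs ps (jn + ps.length) ≤ cs.length :=
    runSkip_le_len cs ps hm (cs.length - (jn + ps.length)) (jn + ps.length) (le_refl _) hle
  have hjcast : PySem.Chars.findFrom cs ps (i:Int) = ((jn : Nat) : Int) := by
    rw [hjdef]; omega
  have hf : cs.length + 2 - i = (cs.length + 1 - i) + 1 := by omega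
  rw [runB, hf, loopB_succ, if_neg hj, hjcast, PySem.List.slice_natCast]
  simp only [Int.toNat_natCast]
  rw [show pvSkipB cs ps (cs.length + 1) (jn + ps.length) = runSkip cs ps (jn + ps.length) from rfl]
  exact runB_eq cs ps hm _ _ _ hsk_le (by omega)

-- match at k ≥ i implies an occurrence in cs.drop i
theorem infix_of_prefix_drop (cs ps : List Char) (i k : Nat) (hik : i ≤ k)
    (h : ps <+: cs.drop k) : ps <:+: cs.drop i := by
  have hdd : cs.drop k = (cs.drop i).drop (k - i) := by
    rw [List.drop_drop]
    congr 1
    omega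
  rw [hdd] at h
  exact h.isInfix.trans (List.drop_suffix _ _).isInfix

-- ==== main simulation ====

theorem main_sim (cs ps : List Char) (hm : ps ≠ []) :
    ∀ d i parts, cs.length - i ≤ d → i ≤ cs.length →
      (runB cs ps i parts).flatten = parts.flatten ++ runA cs ps i [] false := by
  intro d
  induction d with
  | zero =>
    intro i parts hd hi
    have hi' : i = cs.length := by omega
    have hnm : ∀ k, i ≤ k → ¬ ps <+: cs.drop k := by
      intro k hk h
      have : cs.drop k = [] := List.drop_eq_nil_of_le (by omega)
      rw [this] at h
      exact hm (List.prefix_nil.mp h)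
    have hj : PySem.Chars.findFrom cs ps (i:Int) = -1 := by
      rw [PySem.Chars.findFrom_natCast_eq_neg_one_iff cs ps i hi]
      intro hin
      rw [List.drop_eq_nil_of_le (by omega)] at hin
      exact hm (List.infix_nil.mp hin)
    rw [runB_stop cs ps i parts hi hj,
        runA_allnomatch cs ps hm 0 i [] (by omega) hnm]
    simp
  | succ d ih =>
    intro i parts hd hi
    by_cases hj : PySem.Chars.findFrom cs ps (i:Int) = -1
    · have hnocc : ¬ ps <:+: cs.drop i :=
        (PySem.Chars.findFrom_natCast_eq_neg_one_iff cs ps i hi).mp hj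
      have hnm : ∀ k, i ≤ k → ¬ ps <+: cs.drop k := by
        intro k hk h
        rcases Nat.le_total k cs.length with hk2 | hk2
        · exact hnocc (infix_of_prefix_drop cs ps i k hk h)
        · rw [List.drop_eq_nil_of_le (by omega)] at h
          exact hm (List.prefix_nil.mp h)
      rw [runB_stop cs ps i parts hi hj,
          runA_allnomatch cs ps hm (cs.length - i) i [] (le_refl _) hnm]
      simp
    · obtain ⟨hij, hpre, hmin⟩ := PySem.Chars.findFrom_natCast_spec cs ps i hi hj
      have hmlen : 0 < ps.length := List.length_pos_iff.mpr hm
      set jn := (PySem.Chars.findFrom cs ps (i:Int)).toNat with hjdef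
      have hjn_ge : i ≤ jn := by omega
      have hle := prefix_pos_lt hm hpre
      set sk := runSkip cs ps (jn + ps.length) with hskdef
      have hsk_ge : jn + ps.length ≤ sk := skipB_ge cs ps _ _
      have hsk_le : sk ≤ cs.length :=
        runSkip_le_len cs ps hm (cs.length - (jn + ps.length)) (jn + ps.length) (le_refl _) hle
      have hsk_nm : ¬ ps <+: cs.drop sk :=
        runSkip_result_nomatch cs ps hm (cs.length - (jn + ps.length)) (jn + ps.length) (le_refl _)
      -- B side: one outer step, then IH
      rw [runB_step cs ps hm i parts hi hj, ← hjdef, ← hskdef]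
      rw [ih sk _ (by omega) hsk_le]
      -- A side: literal run to jn, emit X, skip the run, drop the true flag
      have hA : runA cs ps i [] false =
          (cs.drop i).take (jn - i) ++ ['X'] ++ runA cs ps sk [] false := by
        rw [runA_literal_run cs ps hm (jn - i) i [] (by omega)
              (fun k hk1 hk2 => hmin k hk1 (by omega))]
        have hji : i + (jn - i) = jn := by omega
        rw [hji]
        rw [runA_match_false cs ps hm jn _ (by omega) hpre]
        rw [runA_skip cs ps hm (cs.length - (jn + ps.length)) (jn + ps.length) _ (le_refl _), ← hskdef]
        rw [runA_true_eq_false cs ps hm sk _ hsk_nm]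
        rw [runA_append cs ps sk _ false]
        simp [List.append_assoc]
      rw [hA]
      simp [List.append_assoc]

-- ===== VERDICT (by name: the statement is the Claim_ definition above) =====
theorem replace_by_x_spec : Claim_equal_replace_by_x := by
  intro s p _ hpre
  unfold Spec_replace_by_x replace_by_x replace_by_x_alt
  have hm : p.toList ≠ [] := fun h => hpre (String.toList_eq_nil_iff.mp h)
  congr 1
  set cs := s.toList
  set ps := p.toList
  have hA : pvLoopA cs ps (cs.length + 1) 0 [] false = runA cs ps 0 [] false :=
    runA_eq cs ps hm (cs.length + 1) 0 [] false (by omega)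
  have hB : pvLoopB cs ps (cs.length + 2) 0 [] = runB cs ps 0 [] :=
    runB_eq cs ps hm (cs.length + 2) 0 [] (by omega) (by omega)
  rw [hA, hB, main_sim cs ps hm cs.length 0 [] (by omega) (by omega)]
  simp
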